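-- pv_equiv track=rewrite | github.com/Poornachandramhegde/Chandonada | chandas_backend/main.py | get_syllables
-- ===== SOURCE A (Python) =====
-- VOWELS     = "aAiIuUfFxXeEoO"
--
-- CONSONANTS = set("kKgGNcCjJYwWqQRtTdDnpPbBmyrlvzSsh")
--
-- def get_syllables(text: str):
--     syllables = []
--     i = 0
--     while i < len(text):
--         syl   = ""
--         start = i
--         if i < len(text) and text[i] in CONSONANTS and text[i] not in "MH":
--             syl += text[i]
--             i   += 1
--         if i < len(text) and text[i] in VOWELS:
--             syl += text[i]
--             i   += 1
--             while i < len(text) and text[i] in CONSONANTS and text[i] not in "MH":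
--                 if i + 1 < len(text) and text[i+1] in CONSONANTS and text[i+1] not in "MH":
--                     syl += text[i]
--                     i   += 1
--                 else:
--                     break
--             if i < len(text) and text[i] in "MH":
--                 syl += text[i]
--                 i   += 1
--         if i == start:
--             i += 1
--         if syl:
--             syllables.append(syl)
--     return syllables
-- ===== SOURCE B (Python) =====
-- import re
--
-- _V = "aAiIuUfFxXeEoO"
-- _C = "kKgGNcCjJYwWqQRtTdDnpPbBmyrlvzSsh"
-- # one syllable: optional consonant, vowel, consonants kept only while followed by
-- # another consonant (lookahead), optional trailing M/H; or a lone consonant.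
-- _SYLLABLE = re.compile(f"[{_C}]?[{_V}](?:[{_C}](?=[{_C}]))*[MH]?|[{_C}]")
--
-- def get_syllables(text: str):
--     return _SYLLABLE.findall(text)
-- ===== Notes on version B (the rewrite author's own statement) =====
-- stated objective: idiomatic
-- what changed: The hand-rolled index-advancing while-loop state machine is replaced by a single compiled regular expression ([C]?[V](?:[C](?=[C]))*[MH]?|[C]) applied with re.findall, whose left-to-right non-overlapping matching reproduces the loop's syllable cuts and its skipping of non-matching characters.
import Mathlib
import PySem

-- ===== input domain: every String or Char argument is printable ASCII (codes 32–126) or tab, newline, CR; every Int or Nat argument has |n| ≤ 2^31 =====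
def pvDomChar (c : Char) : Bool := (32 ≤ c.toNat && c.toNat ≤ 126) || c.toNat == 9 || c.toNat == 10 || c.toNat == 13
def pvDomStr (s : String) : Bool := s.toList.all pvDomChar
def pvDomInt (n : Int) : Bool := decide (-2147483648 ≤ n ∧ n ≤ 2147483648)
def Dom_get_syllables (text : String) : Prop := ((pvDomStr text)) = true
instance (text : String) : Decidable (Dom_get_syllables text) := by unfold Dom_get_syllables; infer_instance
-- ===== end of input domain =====

-- B replaces A's index-advancing while-loop state machine by a compiled regex applied
-- with re.findall (objective: more idiomatic); the return values are proved equal.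

-- ===== PORT A =====
-- Strings are modeled as their character lists; syllables are built as List Char and
-- turned into String at the end (exact: Python's `syl += ch` appends one character).

def pvVOWELS : List Char := "aAiIuUfFxXeEoO".toList
def pvCONSONANTS : List Char := "kKgGNcCjJYwWqQRtTdDnpPbBmyrlvzSsh".toList

-- `text[i] in CONSONANTS and text[i] not in "MH"`
def aTakeC (c : Char) : Bool := pvCONSONANTS.contains c && !("MH".toList.contains c)

-- inner `while` of A: consume a consonant only while the char after it is also one
def aInner : List Char → List Char → List Char × List Char
  | c :: c2 :: rest, syl =>
      if aTakeC c then
        if aTakeC c2 then aInner (c2 :: rest) (syl ++ [c])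
        else (syl, c :: c2 :: rest)
      else (syl, c :: c2 :: rest)
  | rest, syl => (syl, rest)

-- `if i < len(text) and text[i] in "MH": syl += text[i]; i += 1`
def aMH : List Char → List Char → List Char × List Char
  | c :: rest, syl => if "MH".toList.contains c then (syl ++ [c], rest) else (syl, c :: rest)
  | [], syl => (syl, [])

-- length bounds used only for the termination of `aOuter`
theorem aInner_len (rest : List Char) : ∀ syl, (aInner rest syl).2.length ≤ rest.length := by
  induction rest with
  | nil => intro syl; simp [aInner]
  | cons c tail ih =>
    intro syl
    cases tail with
    | nil => simp [aInner]
    | cons c2 r =>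
      by_cases h1 : aTakeC c = true
      · by_cases h2 : aTakeC c2 = true
        · simp only [aInner, h1, h2, if_true]
          exact le_trans (ih _) (by simp)
        · simp [aInner, h1, h2]
      · simp [aInner, h1]

theorem aMH_len (rest syl : List Char) : (aMH rest syl).2.length ≤ rest.length := by
  cases rest with
  | nil => simp [aMH]
  | cons c r =>
    simp only [aMH]
    split <;> simp

-- outer `while` of A
def aOuter : List Char → List (List Char)
  | [] => []
  | c :: rest =>
    if aTakeC c then
      match rest with
      | v :: rest2 =>
        if pvVOWELS.contains v then
          let p := aInner rest2 [c, v]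
          let q := aMH p.2 p.1
          q.1 :: aOuter q.2
        else [c] :: aOuter (v :: rest2)
      | [] => [c] :: aOuter []
    else if pvVOWELS.contains c then
      let p := aInner rest [c]
      let q := aMH p.2 p.1
      q.1 :: aOuter q.2
    else aOuter rest
termination_by l => l.length
decreasing_by
  · have h1 := aMH_len (aInner rest2 [c, v]).2 (aInner rest2 [c, v]).1
    have h2 := aInner_len rest2 [c, v]
    simp only [List.length_cons]
    omega
  · simp
  · simp
  · have h1 := aMH_len (aInner rest [c]).2 (aInner rest [c]).1
    have h2 := aInner_len rest [c]
    simp only [List.length_cons]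
    omega
  · simp

def get_syllables (text : String) : List String :=
  (aOuter text.toList).map (fun l => String.mk l)

-- ===== PORT B =====
-- Source B applies the compiled regex  [C]?[V](?:[C](?=[C]))*[MH]?|[C]  with re.findall.
-- Lean has no `re`; the pattern is matched by hand, sub-pattern by sub-pattern, exact
-- for this pattern (the classes [C] and [V] are disjoint, so re's only backtracking —
-- retrying with the optional leading [C]? empty — can never succeed and is dropped).

def inCls (cls : List Char) (c : Char) : Bool := cls.contains c

-- sub-pattern (?:[C](?=[C]))* : class chars, each followed (lookahead) by another one
def reStarLookahead (cls : List Char) : List Char → List Char × List Char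
  | a :: b :: rest =>
      if inCls cls a && inCls cls b then
        let p := reStarLookahead cls (b :: rest)
        (a :: p.1, p.2)
      else ([], a :: b :: rest)
  | rest => ([], rest)

-- sub-pattern [MH]?
def reOptMH : List Char → List Char × List Char
  | c :: rest => if c == 'M' || c == 'H' then ([c], rest) else ([], c :: rest)
  | [] => ([], [])

-- one attempt of the whole pattern at the current position (none = no match here)
def reMatchSyl : List Char → Option (List Char × List Char)
  | [] => none
  | c :: rest =>
    if inCls pvVOWELS c then          -- [C]? matched empty, [V] first
      let p := reStarLookahead pvCONSONANTS rest
      let q := reOptMH p.2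
      some (c :: (p.1 ++ q.1), q.2)
    else if inCls pvCONSONANTS c then
      match rest with
      | v :: rest2 =>
        if inCls pvVOWELS v then      -- [C][V]… branch of the first alternative
          let p := reStarLookahead pvCONSONANTS rest2
          let q := reOptMH p.2
          some (c :: v :: (p.1 ++ q.1), q.2)
        else some ([c], rest)         -- second alternative `|[C]`
      | [] => some ([c], [])
    else none

-- length bounds used only for the termination of `reFindall`
theorem reStarLookahead_len (cls : List Char) (rest : List Char) :
    (reStarLookahead cls rest).2.length ≤ rest.length := by
  induction rest with
  | nil => simp [reStarLookahead]
  | cons a tail ih =>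
    cases tail with
    | nil => simp [reStarLookahead]
    | cons b r =>
      by_cases h : (inCls cls a && inCls cls b) = true
      · simp only [reStarLookahead, h, if_true]
        exact le_trans ih (by simp)
      · simp [reStarLookahead, h]

theorem reOptMH_len (rest : List Char) : (reOptMH rest).2.length ≤ rest.length := by
  cases rest with
  | nil => simp [reOptMH]
  | cons c r =>
    simp only [reOptMH]
    split <;> simp

theorem reMatchSyl_len {cs m rest' : List Char} (h : reMatchSyl cs = some (m, rest')) :
    rest'.length < cs.length := by
  cases cs with
  | nil => simp [reMatchSyl] at h
  | cons c rest =>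
    by_cases hv : inCls pvVOWELS c = true
    · have l1 := reStarLookahead_len pvCONSONANTS rest
      have l2 := reOptMH_len (reStarLookahead pvCONSONANTS rest).2
      simp [reMatchSyl, hv] at h
      obtain ⟨-, h2⟩ := h
      subst h2
      simp only [List.length_cons]
      omega
    · by_cases hc : inCls pvCONSONANTS c = true
      · cases rest with
        | nil =>
          simp [reMatchSyl, hv, hc] at h
          obtain ⟨-, h2⟩ := h
          subst h2
          simp
        | cons v rest2 =>
          by_cases hv2 : inCls pvVOWELS v = true
          · have l1 := reStarLookahead_len pvCONSONANTS rest2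
            have l2 := reOptMH_len (reStarLookahead pvCONSONANTS rest2).2
            simp [reMatchSyl, hv, hc, hv2] at h
            obtain ⟨-, h2⟩ := h
            subst h2
            simp only [List.length_cons]
            omega
          · simp [reMatchSyl, hv, hc, hv2] at h
            obtain ⟨-, h2⟩ := h
            subst h2
            simp
      · simp [reMatchSyl, hv, hc] at h

-- re.findall: scan left to right; emit a match where one starts, else skip one char
def reFindall (l : List Char) : List (List Char) :=
  match hm : reMatchSyl l with
  | some (m, rest') => m :: reFindall rest'
  | none =>
    match l with
    | [] => []
    | _ :: rest => reFindall rest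
termination_by l.length
decreasing_by
  · exact reMatchSyl_len hm
  · simp

def get_syllables_alt (text : String) : List String :=
  (reFindall text.toList).map (fun l => String.mk l)

-- ===== PRECONDITION & SPEC =====
def Spec_get_syllables (text : String) (out : List String) : Prop := out = get_syllables_alt text
instance (text : String) (out : List String) : Decidable (Spec_get_syllables text out) := by unfold Spec_get_syllables; infer_instance

-- ===== CLAIM (what is proved, stated in full; the proofs are below) =====
def Claim_equal_get_syllables : Prop := ∀ (text : String), Dom_get_syllables text → Spec_get_syllables text (get_syllables text)

-- ===== LEMMAS AND PROOFS =====

-- 'M' and 'H' are not consonants, so A's extra `not in "MH"` test is vacuous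
theorem takeC_eq (c : Char) : aTakeC c = inCls pvCONSONANTS c := by
  unfold aTakeC inCls
  by_cases hM : c = 'M'
  · subst hM; decide
  · by_cases hH : c = 'H'
    · subst hH; decide
    · have hmh : ("MH".toList.contains c) = false := by
        simp [List.contains_eq_mem, hM, hH]
      rw [hmh]
      simp

-- the two character classes are disjoint
theorem vowel_not_cons {c : Char} (h : inCls pvVOWELS c = true) :
    inCls pvCONSONANTS c = false := by
  have hm : c ∈ pvVOWELS := by
    simpa [inCls, List.contains_eq_mem] using h
  rw [show pvVOWELS = ['a','A','i','I','u','U','f','F','x','X','e','E','o','O'] by decide] at hm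
  fin_cases hm <;> decide

-- A's inner loop = the star-with-lookahead sub-pattern, accumulator pulled out
theorem aInner_eq (rest : List Char) : ∀ syl,
    aInner rest syl = (syl ++ (reStarLookahead pvCONSONANTS rest).1,
                       (reStarLookahead pvCONSONANTS rest).2) := by
  induction rest with
  | nil => intro syl; simp [aInner, reStarLookahead]
  | cons a tail ih =>
    intro syl
    cases tail with
    | nil => simp [aInner, reStarLookahead]
    | cons b r =>
      by_cases h1 : aTakeC a = true
      · by_cases h2 : aTakeC b = true
        · have h1' : inCls pvCONSONANTS a = true := by rw [← takeC_eq]; exact h1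
          have h2' : inCls pvCONSONANTS b = true := by rw [← takeC_eq]; exact h2
          simp only [aInner, h1, h2, if_true]
          rw [ih]
          simp [reStarLookahead, h1', h2']
        · have h2' : inCls pvCONSONANTS b = false := by rw [← takeC_eq]; simpa using h2
          simp [aInner, reStarLookahead, h1, h2, h2']
      · have h1' : inCls pvCONSONANTS a = false := by rw [← takeC_eq]; simpa using h1
        simp [aInner, reStarLookahead, h1, h1']

-- A's trailing M/H step = the [MH]? sub-pattern
theorem aMH_eq (rest syl : List Char) :
    aMH rest syl = (syl ++ (reOptMH rest).1, (reOptMH rest).2) := by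
  cases rest with
  | nil => simp [aMH, reOptMH]
  | cons c r =>
    by_cases hM : c = 'M'
    · subst hM; simp [aMH, reOptMH, List.contains_eq_mem]
    · by_cases hH : c = 'H'
      · subst hH; simp [aMH, reOptMH, List.contains_eq_mem]
      · have h1 : ("MH".toList.contains c) = false := by
          simp [List.contains_eq_mem, hM, hH]
        simp [aMH, reOptMH, h1, hM, hH]

-- step lemmas for the two loops, so the main induction can rewrite with them
theorem reFindall_nil : reFindall [] = [] := by
  rw [reFindall.eq_def]
  simp [reMatchSyl]

theorem reFindall_cons_some {c : Char} {rest m rest' : List Char}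
    (h : reMatchSyl (c :: rest) = some (m, rest')) :
    reFindall (c :: rest) = m :: reFindall rest' := by
  rw [reFindall.eq_def]
  split
  · rename_i m2 r2 heq
    rw [h] at heq
    obtain ⟨e1, e2⟩ := Prod.mk.inj (Option.some.inj heq)
    rw [e1, e2]
  · rename_i heq
    rw [h] at heq
    exact absurd heq (by simp)

theorem reFindall_cons_none {c : Char} {rest : List Char}
    (h : reMatchSyl (c :: rest) = none) :
    reFindall (c :: rest) = reFindall rest := by
  rw [reFindall.eq_def]
  split
  · rename_i m2 r2 heq
    rw [h] at heq
    exact absurd heq (by simp)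
  · rfl

theorem aOuter_nil : aOuter [] = [] := by
  rw [aOuter.eq_def]

theorem aOuter_skip {c : Char} {rest : List Char}
    (h1 : aTakeC c = false) (h2 : c ∉ pvVOWELS) :
    aOuter (c :: rest) = aOuter rest := by
  rw [aOuter.eq_def]
  simp [h1, h2]

theorem aOuter_vowel {c : Char} {rest : List Char}
    (h1 : aTakeC c = false) (h2 : c ∈ pvVOWELS) :
    aOuter (c :: rest) =
      (aMH (aInner rest [c]).2 (aInner rest [c]).1).1 ::
        aOuter (aMH (aInner rest [c]).2 (aInner rest [c]).1).2 := by
  rw [aOuter.eq_def]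
  simp [h1, h2]

theorem aOuter_cons_one {c : Char} (h1 : aTakeC c = true) :
    aOuter [c] = [[c]] := by
  rw [aOuter.eq_def]
  simp [h1, aOuter_nil]

theorem aOuter_cons_skip {c v : Char} {rest2 : List Char}
    (h1 : aTakeC c = true) (h2 : v ∉ pvVOWELS) :
    aOuter (c :: v :: rest2) = [c] :: aOuter (v :: rest2) := by
  rw [aOuter.eq_def]
  simp [h1, h2]

theorem aOuter_cons_vowel {c v : Char} {rest2 : List Char}
    (h1 : aTakeC c = true) (h2 : v ∈ pvVOWELS) :
    aOuter (c :: v :: rest2) =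
      (aMH (aInner rest2 [c, v]).2 (aInner rest2 [c, v]).1).1 ::
        aOuter (aMH (aInner rest2 [c, v]).2 (aInner rest2 [c, v]).1).2 := by
  rw [aOuter.eq_def]
  simp [h1, h2]

-- main loop equality: A's outer while = re.findall of the pattern
theorem outer_eq_findall_aux : ∀ (n : ℕ) (cs : List Char), cs.length ≤ n →
    aOuter cs = reFindall cs := by
  intro n
  induction n with
  | zero =>
    intro cs h
    cases cs with
    | nil => rw [aOuter_nil, reFindall_nil]
    | cons c rest => simp at h
  | succ n ih =>
    intro cs h
    cases cs with
    | nil => rw [aOuter_nil, reFindall_nil]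
    | cons c rest =>
      simp only [List.length_cons] at h
      have hr : rest.length ≤ n := by omega
      by_cases hv : inCls pvVOWELS c = true
      · -- vowel first: both take a full syllable
        have hc : inCls pvCONSONANTS c = false := vowel_not_cons hv
        have ht : aTakeC c = false := by rw [takeC_eq]; exact hc
        have hv' : c ∈ pvVOWELS := by simpa [inCls, List.contains_eq_mem] using hv
        have hms : reMatchSyl (c :: rest) =
            some (c :: ((reStarLookahead pvCONSONANTS rest).1 ++
                        (reOptMH (reStarLookahead pvCONSONANTS rest).2).1),
                  (reOptMH (reStarLookahead pvCONSONANTS rest).2).2) := by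
          simp [reMatchSyl, hv]
        rw [reFindall_cons_some hms, aOuter_vowel ht hv', aInner_eq, aMH_eq]
        have hb : (reOptMH (reStarLookahead pvCONSONANTS rest).2).2.length ≤ n := by
          have l1 := reStarLookahead_len pvCONSONANTS rest
          have l2 := reOptMH_len (reStarLookahead pvCONSONANTS rest).2
          omega
        rw [ih _ hb]
        simp
      · by_cases hc : inCls pvCONSONANTS c = true
        · have ht : aTakeC c = true := by rw [takeC_eq]; exact hc
          cases rest with
          | nil =>
            -- lone trailing consonant
            have hms : reMatchSyl [c] = some ([c], []) := by
              simp [reMatchSyl, hv, hc]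
            rw [reFindall_cons_some hms, aOuter_cons_one ht, reFindall_nil]
          | cons v rest2 =>
            by_cases hv2 : inCls pvVOWELS v = true
            · -- consonant + vowel: both take a full syllable
              have hv2' : v ∈ pvVOWELS := by simpa [inCls, List.contains_eq_mem] using hv2
              have hms : reMatchSyl (c :: v :: rest2) =
                  some (c :: v :: ((reStarLookahead pvCONSONANTS rest2).1 ++
                              (reOptMH (reStarLookahead pvCONSONANTS rest2).2).1),
                        (reOptMH (reStarLookahead pvCONSONANTS rest2).2).2) := by
                simp [reMatchSyl, hv, hc, hv2]
              rw [reFindall_cons_some hms, aOuter_cons_vowel ht hv2', aInner_eq, aMH_eq]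
              have hb : (reOptMH (reStarLookahead pvCONSONANTS rest2).2).2.length ≤ n := by
                have l1 := reStarLookahead_len pvCONSONANTS rest2
                have l2 := reOptMH_len (reStarLookahead pvCONSONANTS rest2).2
                simp only [List.length_cons] at h
                omega
              rw [ih _ hb]
              simp
            · -- consonant not followed by a vowel: one-consonant syllable
              have hv2' : v ∉ pvVOWELS := by simpa [inCls, List.contains_eq_mem] using hv2
              have hms : reMatchSyl (c :: v :: rest2) = some ([c], v :: rest2) := by
                simp [reMatchSyl, hv, hc, hv2]
              rw [reFindall_cons_some hms, aOuter_cons_skip ht hv2', ih _ hr]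
        · -- neither class: both skip the character
          have ht : aTakeC c = false := by rw [takeC_eq]; simpa using hc
          have hv' : c ∉ pvVOWELS := by simpa [inCls, List.contains_eq_mem] using hv
          have hms : reMatchSyl (c :: rest) = none := by
            simp [reMatchSyl, hv, hc]
          rw [reFindall_cons_none hms, aOuter_skip ht hv', ih _ hr]

-- ===== VERDICT (by name: the statement is the Claim_ definition above) =====
theorem get_syllables_spec : Claim_equal_get_syllables := by
  intro text _
  unfold Spec_get_syllables get_syllables get_syllables_alt
  rw [outer_eq_findall_aux text.toList.length text.toList le_rfl]
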